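-- pv_equiv track=rewrite | github.com/kristomu/pyvotesim | generators.py | int_to_truncated_ballot
-- ===== SOURCE A (Python) =====
-- def partial_factorial(k, n):
-- 	out = 1
-- 	for i in range(1, n+1):
-- 		if i > n-k:
-- 			out *= i
-- 	return out
--
-- def int_to_partial_permutation(idx, ranks, num_entries):
-- 	entry_list = list(range(num_entries))
-- 	permutation = []
--
-- 	unit_value = partial_factorial(ranks, num_entries)
--
-- 	for base in range(num_entries, num_entries-ranks-1, -1):
-- 		element_this_digit = idx // unit_value
-- 		idx %= unit_value
-- 		if base > 0:
-- 			unit_value //= base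
--
-- 		if base != num_entries:
-- 			permutation.append(entry_list.pop(element_this_digit))
--
-- 	return permutation
--
-- def int_to_truncated_ballot(idx, numcands):
-- 	# Here the idea is that if we know how many candidates the voter
-- 	# ranks before truncating, we could just use
-- 	# int_to_partial_permutation above.
--
-- 	# Thus to produce a general mapping of integers to truncated
-- 	# ballots, we can concatenate the mappings from integers to
-- 	# ballots that rank one candidate, ballots that rank two, and
-- 	# so on, so that:
-- 	# 0 ...n_1 = some ballot that ranks one candidate
-- 	# n_1 ... n_1 + n_2 = some ballot that ranks two,
-- 	# etc.
--
-- 	# The ordering is thus something like: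
-- 	# 	0 ... n!/(n-1)!		                 one candidate chosen
-- 	#	n!/(n-1)! ... n!/(n-1)! + n!/(n-2)!  two candidates
-- 	# etc.
--
-- 	# When turning an integer into a ballot, we first have to find
-- 	# out which stack it is in (i.e. how many candidates it ranks),
-- 	# then its position within the stack (which is resolved by
-- 	# int_to_partial_permutation).
--
-- 	# The closed form expression for \sum i=0...k n!/(n-i)! contains
-- 	# incomplete gamma functions, hence terms of the form floor(e * p!).
-- 	# I don't like mixing ints and floats, so I'm just gonna enumerate
-- 	# the values and make a cumulative list instead.
--
-- 	no_more_than_k_cddts = [0]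
--
-- 	for k in range(1, numcands+1):
-- 		no_more_than_k_cddts.append(no_more_than_k_cddts[-1] + \
-- 			partial_factorial(k, numcands))
--
-- 	# Travel up the list to find the greatest value not exceeding
-- 	# the index. If it's the kth value, then the index belongs to
-- 	# the kth stack, which corresponds to ranking k+1 candidates.
--
-- 	greatest_not_exceeding = 0
-- 	for k in range(1, numcands+1):
-- 		if idx >= no_more_than_k_cddts[k]:
-- 			greatest_not_exceeding = k
--
-- 	# Subtract the value of every stack below this one so that we
-- 	# get the zero-indiced value. Then pass it through the truncated
-- 	# permutation function.
--
-- 	return int_to_partial_permutation(idx - \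
-- 		no_more_than_k_cddts[greatest_not_exceeding],
-- 		greatest_not_exceeding+1, numcands)
-- ===== SOURCE B (Python) =====
-- def int_to_truncated_ballot(idx, numcands):
-- 	# One fused pass keeps the falling factorial and the cumulative ballot
-- 	# count incrementally (no repeated partial_factorial recomputation),
-- 	# then decodes the offset into Lehmer digits least-significant first.
-- 	pf = 1       # numcands! / (numcands-k)! after k rounds
-- 	cum = 0      # number of ballots ranking at most k candidates
-- 	stack = 0    # number of complete stacks below idx
-- 	offset = idx
-- 	for k in range(1, numcands + 1):
-- 		pf *= numcands - k + 1
-- 		cum += pf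
-- 		if idx >= cum:
-- 			stack = k
-- 			offset = idx - cum
-- 	ranks = stack + 1
-- 	# Lehmer digits of offset, least significant (smallest radix) first.
-- 	digits = []
-- 	for r in range(numcands - ranks + 1, numcands + 1):
-- 		digits.append(offset % r)
-- 		offset //= r
-- 	# Apply them most-significant first, selecting among remaining candidates.
-- 	cands = list(range(numcands))
-- 	return [cands.pop(d) for d in reversed(digits)]
-- ===== Notes on version B (the rewrite author's own statement) =====
-- stated objective: faster
-- what changed: One fused pass maintains the falling factorial and cumulative count incrementally (A recomputes partial_factorial from scratch for every k and then scans a prebuilt cumulative list), and the offset is decoded into Lehmer digits least-significant-first by repeated divmod instead of A's unit-value division chain with a dummy first iteration.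
import Mathlib
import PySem

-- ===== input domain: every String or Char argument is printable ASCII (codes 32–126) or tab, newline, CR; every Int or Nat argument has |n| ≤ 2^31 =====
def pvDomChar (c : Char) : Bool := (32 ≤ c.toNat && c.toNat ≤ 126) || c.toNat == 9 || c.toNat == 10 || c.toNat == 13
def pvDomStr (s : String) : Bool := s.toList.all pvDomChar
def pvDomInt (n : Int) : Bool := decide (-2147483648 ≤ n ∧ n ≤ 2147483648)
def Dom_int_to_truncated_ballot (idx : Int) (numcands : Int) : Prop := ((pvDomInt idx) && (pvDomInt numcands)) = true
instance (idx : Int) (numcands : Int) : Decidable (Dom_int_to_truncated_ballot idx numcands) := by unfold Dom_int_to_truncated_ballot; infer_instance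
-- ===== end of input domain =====

-- B fuses A's two passes into one incremental pass and decodes the offset with
-- least-significant-first divmods (measured faster: O(n) vs O(n^2) bigint multiplications).

-- ===== PORT A =====
def partial_factorial (k n : Int) : Int :=
  (PySem.List.pyRange 1 (n + 1) 1).foldl
    (fun out i => if i > n - k then out * i else out) 1

def int_to_partial_permutation (idx ranks num_entries : Int) : List Int :=
  let s := (PySem.List.pyRange num_entries (num_entries - ranks - 1) (-1)).foldl
    (fun (st : Int × Int × List Int × List Int) base =>
      let element_this_digit := PySem.Int.floordiv st.1 st.2.1
      let idx' := PySem.Int.mod st.1 st.2.1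
      let unit' := if base > 0 then PySem.Int.floordiv st.2.1 base else st.2.1
      if base ≠ num_entries then
        match PySem.List.pop? st.2.2.1 element_this_digit with
        | some (v, rest) => (idx', unit', rest, st.2.2.2 ++ [v])
        | none => (idx', unit', st.2.2.1, st.2.2.2)  -- Python raises IndexError here (outside Pre_)
      else (idx', unit', st.2.2.1, st.2.2.2))
    (idx, partial_factorial ranks num_entries, PySem.List.pyRange 0 num_entries 1, [])
  s.2.2.2

def int_to_truncated_ballot (idx : Int) (numcands : Int) : List Int :=
  let no_more := (PySem.List.pyRange 1 (numcands + 1) 1).foldl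
    (fun l k => l ++ [PySem.List.pyGetD l (-1) 0 + partial_factorial k numcands]) [0]
  let g := (PySem.List.pyRange 1 (numcands + 1) 1).foldl
    (fun g k => if idx ≥ PySem.List.pyGetD no_more k 0 then k else g) 0
  int_to_partial_permutation (idx - PySem.List.pyGetD no_more g 0) (g + 1) numcands

-- ===== PORT B =====
def int_to_truncated_ballot_alt (idx : Int) (numcands : Int) : List Int :=
  -- fused pass: (pf, cum, stack, offset)
  let s := (PySem.List.pyRange 1 (numcands + 1) 1).foldl
    (fun (st : Int × Int × Int × Int) k =>
      let pf := st.1 * (numcands - k + 1)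
      let cum := st.2.1 + pf
      if idx ≥ cum then (pf, cum, k, idx - cum) else (pf, cum, st.2.2.1, st.2.2.2))
    (1, 0, 0, idx)
  let ranks := s.2.2.1 + 1
  -- Lehmer digits, least significant first
  let d := (PySem.List.pyRange (numcands - ranks + 1) (numcands + 1) 1).foldl
    (fun (st : List Int × Int) r => (st.1 ++ [PySem.Int.mod st.2 r], PySem.Int.floordiv st.2 r))
    ([], s.2.2.2)
  -- apply most significant first, popping remaining candidates
  let f := d.1.reverse.foldl
    (fun (st : List Int × List Int) dgt =>
      match PySem.List.pop? st.1 dgt with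
      | some (v, rest) => (rest, st.2 ++ [v])
      | none => st)  -- Python raises IndexError here (outside Pre_)
    (PySem.List.pyRange 0 numcands 1, [])
  f.2

-- ===== PRECONDITION & SPEC =====
-- ascending product s * (s+1) * ... * (s+c-1)  (so fallAsc (n-k+1) k = n!/(n-k)!)
def fallAsc (s : Int) : Nat → Int
  | 0 => 1
  | c + 1 => fallAsc s c * (s + c)

-- number of truncated ballots ranking at most k of n candidates
def cumT (n : Int) : Nat → Int
  | 0 => 0
  | k + 1 => cumT n k + fallAsc (n - k) (k + 1)

-- A raises IndexError unless 1 ≤ numcands and idx < (total number of ballots);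
-- for numcands ≥ 13 that total exceeds every idx admitted by Dom (it is ≥ 13! > 2^31),
-- so the explicit bound is only evaluated for numcands < 13 (keeps the instance cheap).
def Pre_int_to_truncated_ballot (idx : Int) (numcands : Int) : Prop :=
  1 ≤ numcands ∧ (13 ≤ numcands ∨ idx < cumT numcands numcands.toNat)
instance (idx : Int) (numcands : Int) : Decidable (Pre_int_to_truncated_ballot idx numcands) := by
  unfold Pre_int_to_truncated_ballot; infer_instance

def pvWitness_int_to_truncated_ballot : Int × Int := (7, 3)

def Spec_int_to_truncated_ballot (idx : Int) (numcands : Int) (out : List Int) : Prop :=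
  out = int_to_truncated_ballot_alt idx numcands
instance (idx : Int) (numcands : Int) (out : List Int) : Decidable (Spec_int_to_truncated_ballot idx numcands out) := by
  unfold Spec_int_to_truncated_ballot; infer_instance

-- ===== CLAIM (what is proved, stated in full; the proofs are below) =====
def Claim_equal_int_to_truncated_ballot : Prop := ∀ (idx : Int) (numcands : Int), Dom_int_to_truncated_ballot idx numcands → Pre_int_to_truncated_ballot idx numcands → Spec_int_to_truncated_ballot idx numcands (int_to_truncated_ballot idx numcands)

-- ===== LEMMAS AND PROOFS =====

-- MSB-first digits of A's division chain: radices (s+c-1), ..., s top-down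
def adig (s : Int) : Nat → Int → List Int
  | 0, _ => []
  | c + 1, t =>
      PySem.Int.floordiv t (fallAsc s c) :: adig s c (PySem.Int.mod t (fallAsc s c))

-- LSB-first digits of B's divmod chain: radices s, s+1, ..., s+c-1 bottom-up
def bdig (a : Int) : Nat → Int → List Int
  | 0, _ => []
  | c + 1, t => PySem.Int.mod t a :: bdig (a + 1) c (PySem.Int.floordiv t a)

-- pop the digits off a candidate list, collecting the popped values
def popGo : List Int → List Int → List Int × List Int
  | el, [] => (el, [])
  | el, d :: ds =>
      match PySem.List.pop? el d with
      | some (v, rest) => ((popGo rest ds).1, v :: (popGo rest ds).2)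
      | none => popGo el ds

theorem fallAsc_succ_left (s : Int) (c : Nat) : fallAsc s (c + 1) = s * fallAsc (s + 1) c := by
  induction c with
  | zero => simp [fallAsc]
  | succ c ih =>
      have : fallAsc s (c + 1 + 1) = fallAsc s (c + 1) * (s + (c + 1)) := rfl
      rw [this, ih]
      have : fallAsc (s + 1) (c + 1) = fallAsc (s + 1) c * (s + 1 + c) := rfl
      rw [this]; ring

theorem fallAsc_pos (s : Int) (hs : 1 ≤ s) (c : Nat) : 0 < fallAsc s c := by
  induction c with
  | zero => simp [fallAsc]
  | succ c ih =>
      have h2 : (1 : Int) ≤ s + c := by omega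
      have : fallAsc s (c + 1) = fallAsc s c * (s + c) := rfl
      rw [this]; positivity

theorem ediv_ediv' (t a b : Int) (ha : 0 < a) (hb : 0 < b) : t / a / b = t / (a * b) := by
  have hab : 0 < a * b := mul_pos ha hb
  have hq := Int.mul_ediv_add_emod t (a * b)
  set q := t / (a * b) with hqdef
  set rem := t % (a * b) with hremdef
  have hrem0 : 0 ≤ rem := Int.emod_nonneg t (by positivity)
  have hremlt : rem < a * b := Int.emod_lt_of_pos t hab
  have h1 : t / a = rem / a + b * q := by
    have : t = rem + a * (b * q) := by rw [← hq]; ring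
    rw [this, Int.add_mul_ediv_left rem (b * q) (by omega)]
  have h2 : rem / a < b := by
    rw [Int.ediv_lt_iff_lt_mul ha]; linarith [hremlt]
  have h3 : 0 ≤ rem / a := Int.ediv_nonneg hrem0 (le_of_lt ha)
  rw [h1]
  have : rem / a + b * q = rem / a + q * b := by ring
  rw [this, Int.add_mul_ediv_right _ q (by omega), Int.ediv_eq_zero_of_lt h3 h2]
  omega

theorem emod_mul_ediv' (t u v : Int) (hu : 0 < u) (hv : 0 < v) :
    t % (u * v) / u = t / u % v := by
  have huv : 0 < u * v := mul_pos hu hv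
  have hmod : t % (u * v) = t - u * v * (t / (u * v)) := by
    have := Int.mul_ediv_add_emod t (u * v); omega
  have h1 : t % (u * v) / u = t / u - v * (t / (u * v)) := by
    rw [hmod]
    have : t - u * v * (t / (u * v)) = t + u * (-(v * (t / (u * v)))) := by ring
    rw [this, Int.add_mul_ediv_left t _ (by omega)]; ring
  have h2 : t / u % v = t / u - v * (t / u / v) := by
    have := Int.mul_ediv_add_emod (t / u) v; omega
  rw [h1, h2, ediv_ediv' t u v hu hv]

theorem bdig_snoc (c : Nat) (a t : Int) (ha : 1 ≤ a) :
    bdig a (c + 1) t =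
      bdig a c t ++ [PySem.Int.mod (PySem.Int.floordiv t (fallAsc a c)) (a + c)] := by
  induction c generalizing a t with
  | zero =>
      have h1 : PySem.Int.floordiv t (fallAsc a 0) = t := by
        rw [show fallAsc a 0 = 1 from rfl, PySem.Int.floordiv_eq_ediv_of_pos one_pos, Int.ediv_one]
      simp [bdig, h1]
  | succ c ih =>
      have ha1 : (1 : Int) ≤ a + 1 := by omega
      have hF : 0 < fallAsc (a + 1) c := fallAsc_pos _ ha1 c
      have hW : 0 < fallAsc a (c + 1) := fallAsc_pos a ha (c + 1)
      have hdd : PySem.Int.floordiv (PySem.Int.floordiv t a) (fallAsc (a + 1) c)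
          = PySem.Int.floordiv t (fallAsc a (c + 1)) := by
        rw [PySem.Int.floordiv_eq_ediv_of_pos (by omega : (0:Int) < a),
            PySem.Int.floordiv_eq_ediv_of_pos hF,
            PySem.Int.floordiv_eq_ediv_of_pos hW,
            ediv_ediv' t a (fallAsc (a + 1) c) (by omega) hF,
            fallAsc_succ_left]
      show PySem.Int.mod t a :: bdig (a + 1) (c + 1) (PySem.Int.floordiv t a) = _
      rw [ih (a + 1) (PySem.Int.floordiv t a) ha1, hdd]
      show _ = (PySem.Int.mod t a :: bdig (a + 1) c (PySem.Int.floordiv t a)) ++ _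
      simp only [List.cons_append]
      push_cast
      ring_nf

theorem rev_bdig (c : Nat) (a t : Int) (ha : 1 ≤ a) :
    (bdig a c t).reverse = adig a c (PySem.Int.mod t (fallAsc a c)) := by
  induction c generalizing t with
  | zero => simp [bdig, adig]
  | succ c ih =>
      have hF : 0 < fallAsc a c := fallAsc_pos a ha c
      have hac : (0 : Int) < a + c := by omega
      have hWeq : fallAsc a (c + 1) = fallAsc a c * (a + c) := rfl
      rw [bdig_snoc c a t ha, List.reverse_append, List.reverse_singleton]
      show PySem.Int.mod (PySem.Int.floordiv t (fallAsc a c)) (a + ↑c) :: (bdig a c t).reverse = _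
      rw [ih t]
      show _ = PySem.Int.floordiv (PySem.Int.mod t (fallAsc a (c + 1))) (fallAsc a c)
          :: adig a c (PySem.Int.mod (PySem.Int.mod t (fallAsc a (c + 1))) (fallAsc a c))
      have hdvd : fallAsc a c ∣ fallAsc a (c + 1) := ⟨a + c, hWeq⟩
      have hW : 0 < fallAsc a (c + 1) := fallAsc_pos a ha (c + 1)
      have e1 : PySem.Int.mod (PySem.Int.floordiv t (fallAsc a c)) (a + ↑c)
          = PySem.Int.floordiv (PySem.Int.mod t (fallAsc a (c + 1))) (fallAsc a c) := by
        rw [PySem.Int.floordiv_eq_ediv_of_pos hF, PySem.Int.mod_eq_emod_of_pos hac,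
            PySem.Int.mod_eq_emod_of_pos hW, PySem.Int.floordiv_eq_ediv_of_pos hF, hWeq,
            emod_mul_ediv' t (fallAsc a c) (a + ↑c) hF hac]
      have e2 : PySem.Int.mod (PySem.Int.mod t (fallAsc a (c + 1))) (fallAsc a c)
          = PySem.Int.mod t (fallAsc a c) := by
        rw [PySem.Int.mod_eq_emod_of_pos hW, PySem.Int.mod_eq_emod_of_pos hF,
            PySem.Int.mod_eq_emod_of_pos hF, Int.emod_emod_of_dvd t hdvd]
      rw [e1, e2]

theorem foldl_popacc (ds : List Int) (el acc : List Int) :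
    ds.foldl
      (fun (st : List Int × List Int) dgt =>
        match PySem.List.pop? st.1 dgt with
        | some (v, rest) => (rest, st.2 ++ [v])
        | none => st) (el, acc)
      = ((popGo el ds).1, acc ++ (popGo el ds).2) := by
  induction ds generalizing el acc with
  | nil => simp [popGo]
  | cons d ds ih =>
      show List.foldl _ _ ds = _
      rcases hp : PySem.List.pop? el d with _ | ⟨v, rest⟩
      · simp only [hp]
        rw [ih el acc]
        simp [popGo, hp]
      · simp only [hp]
        rw [ih rest (acc ++ [v])]
        simp [popGo, hp]

theorem bdigfold (c : Nat) (a t : Int) (acc : List Int) :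
    ((PySem.List.pyRange a (a + (c : Int)) 1).foldl
      (fun (st : List Int × Int) r => (st.1 ++ [PySem.Int.mod st.2 r], PySem.Int.floordiv st.2 r))
      (acc, t)).1 = acc ++ bdig a c t := by
  induction c generalizing a t acc with
  | zero =>
      rw [show ((0 : Nat) : Int) = 0 from rfl, add_zero, PySem.List.pyRange_one_eq_nil (le_refl a)]
      simp [bdig]
  | succ c ih =>
      have hlt : a < a + ((c : Int) + 1) := by omega
      rw [show (((c + 1 : Nat)) : Int) = (c : Int) + 1 by push_cast; ring,
          PySem.List.pyRange_one_cons hlt]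
      show ((PySem.List.pyRange (a + 1) (a + ((c : Int) + 1)) 1).foldl _
        (acc ++ [PySem.Int.mod t a], PySem.Int.floordiv t a)).1 = _
      rw [show a + ((c : Int) + 1) = (a + 1) + (c : Int) by ring,
          ih (a + 1) (PySem.Int.floordiv t a) (acc ++ [PySem.Int.mod t a])]
      simp [bdig]

theorem foldl_if_le (n k : Int) (l : List Int) (acc : Int)
    (h : ∀ i ∈ l, ¬ (n - k < i)) :
    l.foldl (fun out i => if i > n - k then out * i else out) acc = acc := by
  induction l generalizing acc with
  | nil => rfl
  | cons x xs ih =>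
      have hx := h x (by simp)
      simp only [List.foldl_cons, if_neg hx]
      exact ih acc (fun i hi => h i (by simp [hi]))

theorem foldl_if_gt (n k : Int) (l : List Int) (acc : Int)
    (h : ∀ i ∈ l, n - k < i) :
    l.foldl (fun out i => if i > n - k then out * i else out) acc = l.foldl (· * ·) acc := by
  induction l generalizing acc with
  | nil => rfl
  | cons x xs ih =>
      have hx := h x (by simp)
      simp only [List.foldl_cons, if_pos hx]
      exact ih (acc * x) (fun i hi => h i (by simp [hi]))

theorem foldl_mul_fallAsc (c : Nat) (s acc : Int) :
    (PySem.List.pyRange s (s + (c : Int)) 1).foldl (· * ·) acc = acc * fallAsc s c := by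
  induction c generalizing acc with
  | zero =>
      rw [show ((0 : Nat) : Int) = 0 from rfl, add_zero, PySem.List.pyRange_one_eq_nil (le_refl s)]
      simp [fallAsc]
  | succ c ih =>
      rw [show ((c + 1 : Nat) : Int) = (c : Int) + 1 by push_cast; ring,
          show s + ((c : Int) + 1) = (s + (c : Int)) + 1 by ring,
          PySem.List.pyRange_one_succ_right (by omega), List.foldl_append, ih acc]
      show acc * fallAsc s c * (s + (c : Int)) = acc * fallAsc s (c + 1)
      rw [show fallAsc s (c + 1) = fallAsc s c * (s + (c : Int)) from rfl]
      ring

theorem cumT_nonneg (n : Int) (k : Nat) (hk : (k : Int) ≤ n) : 0 ≤ cumT n k := by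
  induction k with
  | zero => simp [cumT]
  | succ k ih =>
      have h1 : (1 : Int) ≤ n - k := by push_cast at hk ⊢; omega
      have h2 := fallAsc_pos (n - k) h1 (k + 1)
      have h3 := ih (by push_cast at hk ⊢; omega)
      show 0 ≤ cumT n k + fallAsc (n - k) (k + 1)
      omega

theorem pfact_eq (k n : Int) (h0 : 0 ≤ k) (h1 : k ≤ n) :
    partial_factorial k n = fallAsc (n - k + 1) k.toNat := by
  have hk : (k.toNat : Int) = k := Int.toNat_of_nonneg h0
  unfold partial_factorial
  rw [PySem.List.pyRange_one_append 1 (n - k + 1) (n + 1) (by omega) (by omega),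
      List.foldl_append,
      foldl_if_le n k _ 1 (fun i hi => by
        rw [PySem.List.mem_pyRange_one] at hi; omega),
      foldl_if_gt n k _ 1 (fun i hi => by
        rw [PySem.List.mem_pyRange_one] at hi; omega),
      show n + 1 = (n - k + 1) + (k.toNat : Int) by omega,
      foldl_mul_fallAsc k.toNat (n - k + 1) 1, one_mul]

theorem aloop (nn s : Int) (hs : 1 ≤ s) (c : Nat) (t : Int) (el perm : List Int)
    (hlt : s + (c : Int) - 1 < nn) :
    ((PySem.List.pyRange (s + (c : Int) - 1) (s - 2) (-1)).foldl
      (fun (st : Int × Int × List Int × List Int) base =>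
        let element_this_digit := PySem.Int.floordiv st.1 st.2.1
        let idx' := PySem.Int.mod st.1 st.2.1
        let unit' := if base > 0 then PySem.Int.floordiv st.2.1 base else st.2.1
        if base ≠ nn then
          match PySem.List.pop? st.2.2.1 element_this_digit with
          | some (v, rest) => (idx', unit', rest, st.2.2.2 ++ [v])
          | none => (idx', unit', st.2.2.1, st.2.2.2)
        else (idx', unit', st.2.2.1, st.2.2.2))
      (t, fallAsc s c, el, perm)).2.2.2
      = perm ++ (popGo el (adig s (c + 1) t)).2 := by
  induction c generalizing t el perm with
  | zero =>
      rw [show s + ((0 : Nat) : Int) - 1 = s - 1 by push_cast; ring,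
          PySem.List.pyRange_neg_one_cons (by omega : s - 2 < s - 1),
          PySem.List.pyRange_neg_one_eq_nil (by omega : s - 1 - 1 ≤ s - 2)]
      have hne : s - 1 ≠ nn := by push_cast at hlt; omega
      have ht1 : PySem.Int.floordiv t (fallAsc s 0) = t := by
        rw [show fallAsc s 0 = 1 from rfl, PySem.Int.floordiv_eq_ediv_of_pos one_pos, Int.ediv_one]
      simp only [List.foldl_cons, List.foldl_nil, if_pos hne, ht1]
      rcases hp : PySem.List.pop? el t with _ | ⟨v, rest⟩
      · simp [adig, popGo, ht1, hp]
      · simp [adig, popGo, ht1, hp]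
  | succ c ih =>
      rw [show s + ((c + 1 : Nat) : Int) - 1 = s + (c : Int) by push_cast; ring,
          PySem.List.pyRange_neg_one_cons (by omega : s - 2 < s + (c : Int))]
      have hpos : s + (c : Int) > 0 := by omega
      have hne : s + (c : Int) ≠ nn := by push_cast at hlt; omega
      have hu : PySem.Int.floordiv (fallAsc s (c + 1)) (s + (c : Int)) = fallAsc s c := by
        rw [show fallAsc s (c + 1) = fallAsc s c * (s + (c : Int)) from rfl,
            PySem.Int.floordiv_eq_ediv_of_pos hpos,
            Int.mul_ediv_cancel _ (by omega : s + (c : Int) ≠ 0)]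
      simp only [List.foldl_cons, if_pos hne, if_pos hpos, hu]
      have hlt' : s + (c : Int) - 1 < nn := by push_cast at hlt; omega
      have hadig : adig s (c + 1 + 1) t
          = PySem.Int.floordiv t (fallAsc s (c + 1))
            :: adig s (c + 1) (PySem.Int.mod t (fallAsc s (c + 1))) := rfl
      rcases hp : PySem.List.pop? el (PySem.Int.floordiv t (fallAsc s (c + 1))) with _ | ⟨v, rest⟩
      · rw [ih (PySem.Int.mod t (fallAsc s (c + 1))) el perm hlt']
        rw [hadig]
        simp [popGo, hp]
      · rw [ih (PySem.Int.mod t (fallAsc s (c + 1))) rest (perm ++ [v]) hlt']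
        rw [hadig]
        simp [popGo, hp]

theorem aperm_eq (nn : Int) (r : Nat) (hr : 1 ≤ r) (hrn : (r : Int) ≤ nn) (t : Int) :
    int_to_partial_permutation t (r : Int) nn =
      (popGo (PySem.List.pyRange 0 nn 1)
        (adig (nn - r + 1) r (PySem.Int.mod t (fallAsc (nn - r + 1) r)))).2 := by
  obtain ⟨c, rfl⟩ : ∃ c, r = c + 1 := ⟨r - 1, by omega⟩
  have hnn : (0 : Int) < nn := by push_cast at hrn; omega
  have hs : 1 ≤ nn - ((c + 1 : Nat) : Int) + 1 := by push_cast at hrn ⊢; omega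
  have hW : fallAsc (nn - ((c + 1 : Nat) : Int) + 1) (c + 1)
      = fallAsc (nn - ((c + 1 : Nat) : Int) + 1) c * nn := by
    rw [show fallAsc (nn - ((c + 1 : Nat) : Int) + 1) (c + 1)
          = fallAsc (nn - ((c + 1 : Nat) : Int) + 1) c
            * ((nn - ((c + 1 : Nat) : Int) + 1) + (c : Int)) from rfl,
        show (nn - ((c + 1 : Nat) : Int) + 1) + (c : Int) = nn by push_cast; ring]
  have hu : PySem.Int.floordiv (fallAsc (nn - ((c + 1 : Nat) : Int) + 1) (c + 1)) nn
      = fallAsc (nn - ((c + 1 : Nat) : Int) + 1) c := by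
    rw [hW, PySem.Int.floordiv_eq_ediv_of_pos hnn, Int.mul_ediv_cancel _ (by omega)]
  unfold int_to_partial_permutation
  rw [pfact_eq ((c + 1 : Nat) : Int) nn (by positivity) hrn,
      show (((c + 1 : Nat) : Int)).toNat = c + 1 by omega,
      PySem.List.pyRange_neg_one_cons
        (show nn - ((c + 1 : Nat) : Int) - 1 < nn by push_cast; omega),
      List.foldl_cons,
      if_neg (show ¬ (nn ≠ nn) by simp), if_pos hnn]
  show (List.foldl _
      (PySem.Int.mod t (fallAsc (nn - ((c + 1 : Nat) : Int) + 1) (c + 1)),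
        PySem.Int.floordiv (fallAsc (nn - ((c + 1 : Nat) : Int) + 1) (c + 1)) nn,
        PySem.List.pyRange 0 nn 1, ([] : List Int))
      (PySem.List.pyRange (nn - 1) (nn - ((c + 1 : Nat) : Int) - 1) (-1))).2.2.2 = _
  rw [hu,
      show nn - 1 = (nn - ((c + 1 : Nat) : Int) + 1) + (c : Int) - 1 by push_cast; ring,
      show nn - ((c + 1 : Nat) : Int) - 1 = (nn - ((c + 1 : Nat) : Int) + 1) - 2 by ring,
      aloop nn (nn - ((c + 1 : Nat) : Int) + 1) hs c
        (PySem.Int.mod t (fallAsc (nn - ((c + 1 : Nat) : Int) + 1) (c + 1)))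
        (PySem.List.pyRange 0 nn 1) [] (by push_cast; omega)]
  simp
theorem cumlist (n : Int) (m : Nat) (hm : (m : Int) ≤ n) :
    (PySem.List.pyRange 1 ((m : Int) + 1) 1).foldl
      (fun l k => l ++ [PySem.List.pyGetD l (-1) 0 + partial_factorial k n]) [0]
      = (PySem.List.pyRange 0 ((m : Int) + 1) 1).map (fun j => cumT n j.toNat) := by
  induction m with
  | zero =>
      rw [show ((0 : Nat) : Int) + 1 = 1 by norm_num,
          PySem.List.pyRange_one_eq_nil (le_refl 1),
          show PySem.List.pyRange 0 1 1 = PySem.List.pyRange 0 (0 + 1) 1 by norm_num,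
          PySem.List.pyRange_one_singleton]
      simp [cumT]
  | succ m ih =>
      have hm' : (m : Int) ≤ n := by push_cast at hm; omega
      have hlast : PySem.List.pyGetD
          ((PySem.List.pyRange 0 ((m : Int) + 1) 1).map (fun j => cumT n j.toNat)) (-1) 0
          = cumT n m := by
        rw [PySem.List.pyRange_one_succ_right (by omega : (0 : Int) ≤ (m : Int)),
            List.map_append]
        simp [PySem.List.pyGetD_neg_one_append_singleton]
      rw [show ((m + 1 : Nat) : Int) + 1 = ((m : Int) + 1) + 1 by push_cast; ring,
          PySem.List.pyRange_one_succ_right (by omega : (1 : Int) ≤ (m : Int) + 1),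
          List.foldl_append, ih hm', List.foldl_cons, List.foldl_nil, hlast,
          pfact_eq ((m : Int) + 1) n (by omega) (by omega),
          show ((m : Int) + 1).toNat = m + 1 by omega,
          show n - ((m : Int) + 1) + 1 = n - (m : Int) by ring]
      rw [PySem.List.pyRange_one_succ_right (by omega : (0 : Int) ≤ (m : Int) + 1),
          List.map_append]
      congr 1

def gAux (idx n : Int) : Nat → Int
  | 0 => 0
  | m + 1 => if idx ≥ cumT n (m + 1) then ((m : Int) + 1) else gAux idx n m

theorem gfold_eq (idx n : Int) (m : Nat) :
    (PySem.List.pyRange 1 ((m : Int) + 1) 1).foldl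
      (fun g k => if idx ≥ cumT n k.toNat then k else g) 0 = gAux idx n m := by
  induction m with
  | zero =>
      rw [show ((0 : Nat) : Int) + 1 = 1 by norm_num, PySem.List.pyRange_one_eq_nil (le_refl 1)]
      rfl
  | succ m ih =>
      rw [show ((m + 1 : Nat) : Int) + 1 = ((m : Int) + 1) + 1 by push_cast; ring,
          PySem.List.pyRange_one_succ_right (by omega), List.foldl_append, ih]
      show (if idx ≥ cumT n ((m : Int) + 1).toNat then (m : Int) + 1 else gAux idx n m) = _
      rw [show ((m : Int) + 1).toNat = m + 1 by omega]
      rfl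

theorem gAux_bounds (idx n : Int) (m : Nat) :
    0 ≤ gAux idx n m ∧ gAux idx n m ≤ (m : Int) ∧
      (gAux idx n m = 0 ∨ idx ≥ cumT n (gAux idx n m).toNat) := by
  induction m with
  | zero => simp [gAux]
  | succ m ih =>
      rw [show gAux idx n (m + 1)
            = (if idx ≥ cumT n (m + 1) then ((m : Int) + 1) else gAux idx n m) from rfl]
      split_ifs with h
      · refine ⟨by omega, by push_cast; omega, Or.inr ?_⟩
        rw [show ((m : Int) + 1).toNat = m + 1 by omega]
        exact h
      · exact ⟨ih.1, by push_cast; omega, ih.2.2⟩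

theorem bscan (idx n : Int) (m : Nat) (hm : (m : Int) ≤ n) :
    (PySem.List.pyRange 1 ((m : Int) + 1) 1).foldl
      (fun (st : Int × Int × Int × Int) k =>
        let pf := st.1 * (n - k + 1)
        let cum := st.2.1 + pf
        if idx ≥ cum then (pf, cum, k, idx - cum) else (pf, cum, st.2.2.1, st.2.2.2))
      (1, 0, 0, idx)
      = (fallAsc (n - (m : Int) + 1) m, cumT n m, gAux idx n m,
          idx - cumT n (gAux idx n m).toNat) := by
  induction m with
  | zero =>
      rw [show ((0 : Nat) : Int) + 1 = 1 by norm_num, PySem.List.pyRange_one_eq_nil (le_refl 1)]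
      simp [gAux, cumT, fallAsc]
  | succ m ih =>
      have hm' : (m : Int) ≤ n := by push_cast at hm; omega
      rw [show ((m + 1 : Nat) : Int) + 1 = ((m : Int) + 1) + 1 by push_cast; ring,
          PySem.List.pyRange_one_succ_right (by omega), List.foldl_append, ih hm']
      have hpf : fallAsc (n - (m : Int) + 1) m * (n - ((m : Int) + 1) + 1)
          = fallAsc (n - ((m + 1 : Nat) : Int) + 1) (m + 1) := by
        rw [show n - ((m + 1 : Nat) : Int) + 1 = n - (m : Int) by push_cast; ring,
            fallAsc_succ_left (n - (m : Int)) m,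
            show n - (m : Int) + 1 = n - (m : Int) + 1 from rfl]
        ring_nf
      have hcum : cumT n m + fallAsc (n - (m : Int) + 1) m * (n - ((m : Int) + 1) + 1)
          = cumT n (m + 1) := by
        rw [show cumT n (m + 1) = cumT n m + fallAsc (n - (m : Int)) (m + 1) from rfl,
            fallAsc_succ_left (n - (m : Int)) m]
        ring_nf
      show (if idx ≥ cumT n m + fallAsc (n - (m : Int) + 1) m * (n - ((m : Int) + 1) + 1)
          then _ else _) = _
      rw [hcum]
      show _ = (fallAsc (n - ((m + 1 : Nat) : Int) + 1) (m + 1), cumT n (m + 1),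
        gAux idx n (m + 1), idx - cumT n (gAux idx n (m + 1)).toNat)
      rw [show gAux idx n (m + 1)
            = (if idx ≥ cumT n (m + 1) then ((m : Int) + 1) else gAux idx n m) from rfl]
      split_ifs with h
      · rw [show (((m : Int) + 1)).toNat = m + 1 by omega, ← hpf, ← hcum]
      · rw [← hpf, ← hcum]

theorem fallAsc_one_factorial (c : Nat) : fallAsc 1 c = (Nat.factorial c : Int) := by
  induction c with
  | zero => simp [fallAsc, Nat.factorial]
  | succ c ih =>
      rw [show fallAsc 1 (c + 1) = fallAsc 1 c * (1 + (c : Int)) from rfl, ih,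
          Nat.factorial_succ]
      push_cast; ring

theorem thirteen (n : Int) (hn : 13 ≤ n) : (2147483648 : Int) < cumT n n.toNat := by
  have hN : (n.toNat : Int) = n := Int.toNat_of_nonneg (by omega)
  obtain ⟨M, hM⟩ : ∃ M, n.toNat = M + 1 := ⟨n.toNat - 1, by omega⟩
  have h13 : 13 ≤ M + 1 := by omega
  have hcum : cumT n n.toNat = cumT n M + fallAsc (n - M) (M + 1) := by rw [hM]; rfl
  have hMn : ((M : Nat) : Int) ≤ n := by omega
  have h0 : 0 ≤ cumT n M := cumT_nonneg n M hMn
  have hnm : n - (M : Int) = 1 := by omega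
  have hfact : fallAsc (n - M) (M + 1) = (Nat.factorial (M + 1) : Int) := by
    rw [hnm, fallAsc_one_factorial]
  have hge : Nat.factorial 13 ≤ Nat.factorial (M + 1) := Nat.factorial_le h13
  have h13v : Nat.factorial 13 = 6227020800 := by decide
  have : (2147483648 : Int) < (Nat.factorial (M + 1) : Int) := by
    have : (6227020800 : Nat) ≤ Nat.factorial (M + 1) := by omega
    exact_mod_cast by omega
  rw [hcum, hfact]; omega

theorem foldl_congr' {α β : Type} (f g : β → α → β) (l : List α) (i : β)
    (h : ∀ b x, x ∈ l → f b x = g b x) : l.foldl f i = l.foldl g i := by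
  induction l generalizing i with
  | nil => rfl
  | cons x xs ih =>
      rw [List.foldl_cons, List.foldl_cons, h i x (by simp)]
      exact ih _ (fun b y hy => h b y (by simp [hy]))

-- ===== VERDICT (by name: the statement is the Claim_ definition above) =====
theorem int_to_truncated_ballot_spec : Claim_equal_int_to_truncated_ballot := by
  unfold Claim_equal_int_to_truncated_ballot
  intro idx n hdom hpre
  obtain ⟨hn1, hdis⟩ := hpre
  have hN : ((n.toNat : Nat) : Int) = n := Int.toNat_of_nonneg (by omega)
  have hidx : idx < cumT n n.toNat := by
    rcases hdis with h13 | h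
    · have hdi : idx ≤ 2147483648 := by
        simp only [Dom_int_to_truncated_ballot, pvDomInt, Bool.and_eq_true,
          decide_eq_true_eq] at hdom
        exact hdom.1.2
      exact lt_of_le_of_lt hdi (thirteen n h13)
    · exact h
  unfold Spec_int_to_truncated_ballot
  simp only [int_to_truncated_ballot, int_to_truncated_ballot_alt]
  have hcl := cumlist n n.toNat (le_of_eq hN)
  rw [hN] at hcl
  rw [hcl]
  have hcong := foldl_congr'
    (fun g k => if idx ≥ PySem.List.pyGetD
      ((PySem.List.pyRange 0 (n + 1) 1).map (fun j => cumT n j.toNat)) k 0 then k else g)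
    (fun g k => if idx ≥ cumT n k.toNat then k else g)
    (PySem.List.pyRange 1 (n + 1) 1) 0
    (by
      intro b x hx
      rw [PySem.List.mem_pyRange_one] at hx
      beta_reduce
      rw [PySem.List.pyGetD_map_pyRange_of_nonneg _ _ _ _ (by omega) (by omega)])
  rw [hcong]
  have hg := gfold_eq idx n n.toNat
  rw [hN] at hg
  rw [hg]
  obtain ⟨hg0, hgle, hgor⟩ := gAux_bounds idx n n.toNat
  rw [hN] at hgle
  set g := gAux idx n n.toNat with hgdef
  have hglt : g ≤ n - 1 := by
    by_contra h'
    have hgn : g = n := by omega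
    rcases hgor with h0 | hge
    · omega
    · rw [hgn] at hge
      rw [show n.toNat = n.toNat from rfl] at hge
      omega
  rw [PySem.List.pyGetD_map_pyRange_of_nonneg _ _ _ _ hg0 (by omega)]
  have hb := bscan idx n n.toNat (le_of_eq hN)
  rw [hN] at hb
  rw [hb]
  have hr : ((g.toNat + 1 : Nat) : Int) = g + 1 := by omega
  rw [← hr]
  rw [aperm_eq n (g.toNat + 1) (by omega) (by rw [hr]; omega) (idx - cumT n g.toNat)]
  rw [show n + 1 = (n - ((g.toNat + 1 : Nat) : Int) + 1) + ((g.toNat + 1 : Nat) : Int)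
        by push_cast; omega,
      bdigfold (g.toNat + 1) (n - ((g.toNat + 1 : Nat) : Int) + 1) (idx - cumT n g.toNat) [],
      List.nil_append,
      rev_bdig (g.toNat + 1) (n - ((g.toNat + 1 : Nat) : Int) + 1) (idx - cumT n g.toNat)
        (by rw [hr]; omega),
      foldl_popacc _ (PySem.List.pyRange 0 n 1) [], List.nil_append]
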